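-- pv_equiv track=rewrite | github.com/jpsamuelson/aurora-icepower-booster | scripts/p3_move_and_strip.py | find_footprint_block
-- ===== SOURCE A (Python) =====
-- def find_footprint_block(text, ref):
--     for pattern in [f'(property "Reference" "{ref}"', f'fp_text reference "{ref}"']:
--         idx = text.find(pattern)
--         if idx >= 0:
--             break
--     else:
--         return None, None
--     depth = 0
--     start = idx
--     while start > 0:
--         if text[start] == ')': depth += 1
--         elif text[start] == '(':
--             depth -= 1
--             if depth < 0:
--                 after = text[start:start+20]
--                 if '(footprint ' in after or '(footprint\n' in after:
--                     break
--         start -= 1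
--     depth = 0
--     end = start
--     while end < len(text):
--         if text[end] == '(': depth += 1
--         elif text[end] == ')':
--             depth -= 1
--             if depth == 0:
--                 end += 1
--                 break
--         end += 1
--     return start, end
-- ===== SOURCE B (Python) =====
-- def find_footprint_block(text, ref):
--     for pattern in (f'(property "Reference" "{ref}"', f'fp_text reference "{ref}"'):
--         idx = text.find(pattern)
--         if idx >= 0:
--             break
--     else:
--         return None, None
--
--     def opens_footprint(p):
--         # a '(' that introduces a footprint expression: the header text
--         # '(footprint' begins within the next 20 characters
--         window = text[p:p + 20]
--         return text[p] == '(' and ('(footprint ' in window or '(footprint\n' in window)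
--
--     # One forward pass up to the match, remembering per nesting depth the most
--     # recent footprint-opening paren seen at that depth; the enclosing block is
--     # the latest one opened at a depth shallower than the reference's depth.
--     depth = 0
--     last_at_depth = {}
--     for p in range(idx + 1):
--         if opens_footprint(p):
--             last_at_depth[depth] = p
--         if text[p] == '(':
--             depth += 1
--         elif text[p] == ')':
--             depth -= 1
--     start = max((q for d, q in last_at_depth.items() if d < depth), default=0)
--
--     # From the block's opening paren, scan to just past the paren that closes it.
--     bal = 0
--     end = len(text)
--     for j in range(start, len(text)):
--         bal += (text[j] == '(') - (text[j] == ')')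
--         if bal == 0 and text[j] == ')':
--             end = j + 1
--             break
--     return start, end
-- ===== Notes on version B (the rewrite author's own statement) =====
-- stated objective: alternative
-- what changed: A scans backward from the match counting paren depth until it hits the enclosing footprint-opening paren; B instead makes one forward pass up to the match keeping, per nesting depth, the last footprint-opening paren seen at that depth, then takes the latest one opened at a depth shallower than the match's depth, and finds the block's close by a running paren balance.
import Mathlib
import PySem

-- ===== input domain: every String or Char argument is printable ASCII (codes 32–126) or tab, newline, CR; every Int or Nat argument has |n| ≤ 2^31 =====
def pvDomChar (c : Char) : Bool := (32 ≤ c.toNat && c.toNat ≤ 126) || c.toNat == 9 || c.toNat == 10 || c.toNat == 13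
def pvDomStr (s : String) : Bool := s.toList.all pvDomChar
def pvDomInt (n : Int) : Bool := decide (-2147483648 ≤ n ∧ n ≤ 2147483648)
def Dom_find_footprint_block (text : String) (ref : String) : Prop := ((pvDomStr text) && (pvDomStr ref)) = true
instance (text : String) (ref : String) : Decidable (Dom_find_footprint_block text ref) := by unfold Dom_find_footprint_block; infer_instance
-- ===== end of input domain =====

-- B replaces A's backward depth-counting scan with one forward pass that remembers, per
-- nesting depth, the last footprint-opening paren seen at that depth (objective: alternative).
-- Both programs agree on every input; A is total, so there is no Pre_.

-- ===== PORT A =====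

-- the 20-char-window test shared by both Pythons ('(footprint ' in after or '(footprint\n' in after)
def fbWin (t : List Char) (s : Nat) : Bool :=
  let after := (t.drop s).take 20
  PySem.Chars.isIn "(footprint ".toList after || PySem.Chars.isIn "(footprint\n".toList after

-- A's backward while-loop (state: start, depth)
def fbBack (t : List Char) (start : Nat) (depth : Int) : Nat :=
  if start = 0 then 0
  else if t.getD start ' ' = ')' then fbBack t (start - 1) (depth + 1)
  else if t.getD start ' ' = '(' then
    if depth - 1 < 0 ∧ fbWin t start then start
    else fbBack t (start - 1) (depth - 1)
  else fbBack t (start - 1) depth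
termination_by start

-- A's forward while-loop (state: end, depth)
def fbFwd (t : List Char) (e : Nat) (depth : Int) : Nat :=
  if e < t.length then
    if t.getD e ' ' = '(' then fbFwd t (e + 1) (depth + 1)
    else if t.getD e ' ' = ')' then
      if depth - 1 = 0 then e + 1 else fbFwd t (e + 1) (depth - 1)
    else fbFwd t (e + 1) depth
  else e
termination_by t.length - e

def find_footprint_block (text : String) (ref : String) : Option Int × Option Int :=
  let t := text.toList
  let pat1 := "(property \"Reference\" \"".toList ++ ref.toList ++ ['"']
  let pat2 := "fp_text reference \"".toList ++ ref.toList ++ ['"']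
  let i1 := PySem.Chars.find t pat1
  let idx := if 0 ≤ i1 then i1 else PySem.Chars.find t pat2
  if 0 ≤ idx then
    let start := fbBack t idx.toNat 0
    let e := fbFwd t start 0
    (some (start : Int), some (e : Int))
  else (none, none)

-- ===== PORT B =====

-- Source B's opens_footprint(p)
def fbOpens (t : List Char) (p : Nat) : Bool :=
  (t.getD p ' ' = '(') && fbWin t p

-- one iteration of Source B's forward pass (state: depth, last_at_depth)
def fbStep (t : List Char) (s : Int × PySem.Dict Int Nat) (p : Nat) : Int × PySem.Dict Int Nat :=
  let s' := if fbOpens t p then (s.1, s.2.insert s.1 p) else s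
  (s'.1 + (if t.getD p ' ' = '(' then 1 else if t.getD p ' ' = ')' then -1 else 0), s'.2)

-- Source B's closing-paren loop (state: j, bal)
def fbEnd (t : List Char) (j : Nat) (bal : Int) : Nat :=
  if j < t.length then
    let bal' := bal + (if t.getD j ' ' = '(' then 1 else if t.getD j ' ' = ')' then -1 else 0)
    if bal' = 0 ∧ t.getD j ' ' = ')' then j + 1 else fbEnd t (j + 1) bal'
  else t.length
termination_by t.length - j

def find_footprint_block_alt (text : String) (ref : String) : Option Int × Option Int :=
  let t := text.toList
  let pat1 := "(property \"Reference\" \"".toList ++ ref.toList ++ ['"']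
  let pat2 := "fp_text reference \"".toList ++ ref.toList ++ ['"']
  let i1 := PySem.Chars.find t pat1
  let idx := if 0 ≤ i1 then i1 else PySem.Chars.find t pat2
  if 0 ≤ idx then
    let st := (List.range (idx.toNat + 1)).foldl (fbStep t) (0, PySem.Dict.empty)
    let cands := (st.2.items.filter (fun kv => decide (kv.1 < st.1))).map (·.2)
    let start := (PySem.List.max? cands (fun x => x)).getD 0
    let e := fbEnd t start 0
    (some (start : Int), some (e : Int))
  else (none, none)

-- ===== PRECONDITION & SPEC =====
def Spec_find_footprint_block (text : String) (ref : String) (out : Option Int × Option Int) : Prop := out = find_footprint_block_alt text ref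
instance (text : String) (ref : String) (out : Option Int × Option Int) : Decidable (Spec_find_footprint_block text ref out) := by unfold Spec_find_footprint_block; infer_instance

-- ===== CLAIM (what is proved, stated in full; the proofs are below) =====
def Claim_equal_find_footprint_block : Prop := ∀ (text : String) (ref : String), Dom_find_footprint_block text ref → Spec_find_footprint_block text ref (find_footprint_block text ref)

-- ===== LEMMAS AND PROOFS =====

-- the paren delta of one character
def pvD (c : Char) : Int := if c = '(' then 1 else if c = ')' then -1 else 0

-- prefix balance: balF t i = #'(' - #')' in t.take i
def balF (t : List Char) : Nat → Int
  | 0 => 0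
  | i + 1 => balF t i + pvD (t.getD i ' ')

-- the condition A's backward scan breaks on, phrased on prefix balances
def condA (t : List Char) (B : Int) (p : Nat) : Bool :=
  fbOpens t p && decide (balF t p < B)

-- A's backward while-loop finds the greatest position ≤ s satisfying condA
lemma fbBack_eq (t : List Char) (B : Int) :
    ∀ s : Nat, fbBack t s (balF t (s + 1) - B)
      = Nat.findGreatest (fun p => condA t B p = true) s := by
  intro s
  induction s with
  | zero => simp [fbBack, Nat.findGreatest]
  | succ s ih =>
    have hb : balF t (s + 2) = balF t (s + 1) + pvD (t.getD (s + 1) ' ') := rfl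
    rw [Nat.findGreatest_succ]
    conv_lhs => rw [fbBack]
    rw [if_neg (Nat.succ_ne_zero s), Nat.add_sub_cancel]
    by_cases h1 : t.getD (s + 1) ' ' = ')'
    · have hP : ¬ (condA t B (s + 1) = true) := by
        unfold condA fbOpens; rw [h1]; simp
      have hd : balF t (s + 1 + 1) - B + 1 = balF t (s + 1) - B := by
        rw [hb, h1] at *; simp [pvD]; ring
      rw [if_pos h1, hd, ih, if_neg hP]
    · by_cases h2 : t.getD (s + 1) ' ' = '('
      · have hd : balF t (s + 1 + 1) - B - 1 = balF t (s + 1) - B := by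
          rw [hb, h2] at *; simp [pvD]; ring
        rw [if_neg h1, if_pos h2]
        have hcond : (condA t B (s + 1) = true) ↔ (balF t (s + 1) < B ∧ fbWin t (s + 1) = true) := by
          unfold condA fbOpens; rw [h2]; simp; tauto
        by_cases h3 : balF t (s + 1) < B ∧ fbWin t (s + 1) = true
        · rw [if_pos (⟨by rw [hd]; omega, h3.2⟩ : balF t (s + 1 + 1) - B - 1 < 0 ∧ fbWin t (s + 1) = true),
            if_pos (hcond.mpr h3)]
        · rw [if_neg (by rw [hd]; rintro ⟨hlt', hw⟩; exact h3 ⟨by omega, hw⟩), hd, ih,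
            if_neg (fun hc => h3 (hcond.mp hc))]
      · have hd : balF t (s + 1 + 1) - B = balF t (s + 1) - B := by
          rw [hb]; unfold pvD; rw [if_neg h2, if_neg h1]; ring
        have hP : ¬ (condA t B (s + 1) = true) := by
          unfold condA fbOpens; rw [decide_eq_false h2]; simp
        rw [if_neg h1, if_neg h2, hd, ih, if_neg hP]

-- B's forward-pass state after m characters
def fbS (t : List Char) (m : Nat) : Int × PySem.Dict Int Nat :=
  (List.range m).foldl (fbStep t) (0, PySem.Dict.empty)

lemma fbS_succ (t : List Char) (m : Nat) :
    fbS t (m + 1) = fbStep t (fbS t m) m := by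
  unfold fbS
  rw [List.range_succ, List.foldl_append, List.foldl_cons, List.foldl_nil]

lemma fbS_fst (t : List Char) (m : Nat) : (fbS t m).1 = balF t m := by
  induction m with
  | zero => rfl
  | succ m ih =>
    rw [fbS_succ, balF]
    unfold fbStep pvD
    by_cases h : fbOpens t m = true
    · simp [h, ih]
    · simp [h, ih]

lemma fbS_nodup (t : List Char) (m : Nat) : (fbS t m).2.keys.Nodup := by
  induction m with
  | zero => exact PySem.Dict.nodup_keys_empty
  | succ m ih =>
    rw [fbS_succ]
    unfold fbStep
    by_cases h : fbOpens t m = true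
    · simpa [h] using PySem.Dict.nodup_keys_insert _ _ _ ih
    · simpa [h] using ih

-- what Source B's dict means: membership at key d is "qualifying position, last one at depth d"
def fbP (t : List Char) (d : Int) (p : Nat) : Prop :=
  fbOpens t p = true ∧ balF t p = d

lemma fbS_get? (t : List Char) (m : Nat) (d : Int) (p : Nat) :
    ((fbS t m).2.get? d = some p)
      ↔ (p < m ∧ fbP t d p ∧ ∀ q, p < q → q < m → ¬ fbP t d q) := by
  induction m with
  | zero =>
    simp [fbS, PySem.Dict.get?_empty]
  | succ m ih =>
    rw [fbS_succ]
    unfold fbStep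
    by_cases hop : fbOpens t m = true
    · simp only [hop, if_true]
      rw [PySem.Dict.get?_insert, fbS_fst]
      by_cases hd : d = balF t m
      · rw [if_pos hd]
        constructor
        · rintro h
          have hpm : m = p := by injection h
          subst hpm
          exact ⟨Nat.lt_succ_self m, ⟨hop, hd.symm⟩, fun q hq1 hq2 _ => by omega⟩
        · rintro ⟨hpm, hP, hlast⟩
          have : p = m := by
            by_contra hne
            have hplt : p < m := by omega
            exact hlast m hplt (Nat.lt_succ_self m) ⟨hop, hd.symm⟩
          rw [this]
      · rw [if_neg hd]
        rw [ih]
        have hnm : ¬ fbP t d m := fun h => hd (h.2.symm)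
        constructor
        · rintro ⟨h1, h2, h3⟩
          refine ⟨by omega, h2, fun q hq1 hq2 => ?_⟩
          by_cases hqm : q = m
          · rw [hqm]; exact hnm
          · exact h3 q hq1 (by omega)
        · rintro ⟨h1, h2, h3⟩
          have hpm : p ≠ m := fun h => hnm (h ▸ h2)
          exact ⟨by omega, h2, fun q hq1 hq2 => h3 q hq1 (by omega)⟩
    · rw [if_neg hop]
      rw [show ((fbS t m).1 + (if t.getD m ' ' = '(' then (1:Int) else if t.getD m ' ' = ')' then -1 else 0), (fbS t m).2).2 = (fbS t m).2 from rfl]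
      rw [ih]
      have hnm : ¬ fbP t d m := fun h => hop h.1
      constructor
      · rintro ⟨h1, h2, h3⟩
        refine ⟨by omega, h2, fun q hq1 hq2 => ?_⟩
        by_cases hqm : q = m
        · rw [hqm]; exact hnm
        · exact h3 q hq1 (by omega)
      · rintro ⟨h1, h2, h3⟩
        have hpm : p ≠ m := fun h => hnm (h ▸ h2)
        exact ⟨by omega, h2, fun q hq1 hq2 => h3 q hq1 (by omega)⟩

-- running max over a list containing all the needed witnesses of P up to i
lemma foldlmax_eq (i : Nat) (l : List Nat) (P : Nat → Bool)
    (hsound : ∀ p ∈ l, p ≤ i ∧ P p = true)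
    (hgr : ∀ p, 1 ≤ p → p ≤ i → P p = true → (∀ q, p < q → q ≤ i → ¬ P q = true) → p ∈ l) :
    l.foldl max 0 = Nat.findGreatest (fun p => P p = true) i := by
  apply Nat.le_antisymm
  · rcases PySem.List.foldl_max_mem l 0 with h | h
    · simp [h]
    · obtain ⟨hi', hP⟩ := hsound _ h
      exact Nat.le_findGreatest hi' hP
  · set g := Nat.findGreatest (fun p => P p = true) i with hg
    by_cases hg0 : g = 0
    · simp [hg0]
    · have hgpos : 0 < g := Nat.pos_of_ne_zero hg0
      have hwit : ∃ m, 0 < m ∧ m ≤ i ∧ P m = true := by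
        by_contra hc
        exact hg0 (Nat.findGreatest_eq_zero_iff.mpr (fun n h1n h2n hP => hc ⟨n, h1n, h2n, hP⟩))
      obtain ⟨m, hm0, hmi, hmP⟩ := hwit
      have hPg : P g = true := Nat.findGreatest_spec (P := fun p => P p = true) hmi hmP
      have hmax : ∀ q, g < q → q ≤ i → ¬ P q = true := by
        intro q hq1 hq2
        exact Nat.findGreatest_is_greatest hq1 hq2
      have hgl : g ∈ l := hgr g hgpos (Nat.findGreatest_le i) hPg hmax
      exact (PySem.List.le_foldl_max l 0).2 g hgl

-- B's start computation equals A's findGreatest characterisation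
lemma start_eq (t : List Char) (i : Nat) :
    ((((fbS t (i + 1)).2.items.filter (fun kv => decide (kv.1 < (fbS t (i + 1)).1))).map (·.2)).foldl max 0)
      = Nat.findGreatest (fun p => condA t (balF t (i + 1)) p = true) i := by
  set B := balF t (i + 1) with hB
  apply foldlmax_eq
  · intro p hp
    simp only [List.mem_map, List.mem_filter, decide_eq_true_eq] at hp
    obtain ⟨⟨d, v⟩, ⟨hitems, hlt⟩, hv⟩ := hp
    subst hv
    have hget : (fbS t (i + 1)).2.get? d = some v :=
      PySem.Dict.get?_of_mem_items _ hitems (fbS_nodup t (i + 1))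
    rw [fbS_get?] at hget
    obtain ⟨h1, ⟨hop, hbal⟩, -⟩ := hget
    rw [fbS_fst] at hlt
    have hlt' : d < B := by simpa [hB] using hlt
    refine ⟨by omega, ?_⟩
    unfold condA
    simp only [hop, Bool.true_and, decide_eq_true_eq, hbal]
    exact hlt'
  · intro p hp1 hpi hP hmax
    have hcond : fbOpens t p = true ∧ balF t p < B := by
      unfold condA at hP
      simpa using hP
    have hget : (fbS t (i + 1)).2.get? (balF t p) = some p := by
      rw [fbS_get?]
      refine ⟨by omega, ⟨hcond.1, rfl⟩, fun q hq1 hq2 hQ => ?_⟩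
      refine hmax q hq1 (by omega) ?_
      unfold condA
      simp [hQ.1, hQ.2, hcond.2]
    have hitems : (balF t p, p) ∈ (fbS t (i + 1)).2.items :=
      PySem.Dict.mem_items_of_get?_eq_some _ hget
    simp only [List.mem_map, List.mem_filter, decide_eq_true_eq]
    exact ⟨(balF t p, p), ⟨hitems, by rw [fbS_fst]; exact hcond.2⟩, rfl⟩

-- Source B's closing loop computes the same position as A's forward loop
lemma fbEnd_eq_fbFwd (t : List Char) :
    ∀ k j b, t.length - j = k → j ≤ t.length → fbEnd t j b = fbFwd t j b := by
  intro k
  induction k with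
  | zero =>
    intro j b hk hj
    have : j = t.length := by omega
    rw [fbEnd, fbFwd, if_neg (by omega), if_neg (by omega), this]
  | succ k ih =>
    intro j b hk hj
    have hlt : j < t.length := by omega
    rw [fbEnd, fbFwd, if_pos hlt, if_pos hlt]
    by_cases h1 : t.getD j ' ' = '('
    · simp only [h1, if_true]
      rw [if_neg (by rintro ⟨-, h⟩; exact absurd h (by decide))]
      exact ih (j + 1) (b + 1) (by omega) (by omega)
    · by_cases h2 : t.getD j ' ' = ')'
      · simp only [h2, if_true, and_true]
        rw [show (if (')':Char) = '(' then (1:Int) else -1) = -1 from by decide,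
          show b + (-1:Int) = b - 1 from by ring]
        by_cases h3 : b - 1 = 0
        · rw [if_pos h3, if_neg (by decide), if_pos h3]
        · rw [if_neg h3, if_neg (by decide), if_neg h3]
          exact ih (j + 1) (b - 1) (by omega) (by omega)
      · simp only [h1, h2, and_false, if_false, add_zero]
        exact ih (j + 1) b (by omega) (by omega)

-- Python max(xs, default=0) on Nats is the running max from 0
lemma maxD_eq_foldl (l : List Nat) :
    (PySem.List.max? l (fun x => x)).getD 0 = l.foldl max 0 := by
  cases l with
  | nil => simp [PySem.List.max?]
  | cons x t =>
    rw [PySem.List.max?_id_cons]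
    simp [List.foldl_cons]

lemma find_toNat_lt {t sub : List Char} (hsub : sub ≠ [])
    (h : 0 ≤ PySem.Chars.find t sub) : (PySem.Chars.find t sub).toNat < t.length := by
  obtain ⟨hpre, -⟩ := PySem.Chars.find_spec h
  have h1 := hpre.length_le
  have h2 : 0 < sub.length := List.length_pos_iff.mpr hsub
  simp [List.length_drop] at h1
  omega

-- ===== VERDICT (by name: the statement is the Claim_ definition above) =====
theorem find_footprint_block_spec : Claim_equal_find_footprint_block := by
  intro text ref _
  unfold Spec_find_footprint_block
  simp only [find_footprint_block, find_footprint_block_alt]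
  set t := text.toList with ht
  set pat1 := "(property \"Reference\" \"".toList ++ ref.toList ++ ['"'] with hpat1
  set pat2 := "fp_text reference \"".toList ++ ref.toList ++ ['"'] with hpat2
  set i1 := PySem.Chars.find t pat1 with hi1
  set idx := if 0 ≤ i1 then i1 else PySem.Chars.find t pat2 with hidx
  by_cases h0 : 0 ≤ idx
  · rw [if_pos h0, if_pos h0]
    have hlt : idx.toNat < t.length := by
      rw [hidx]
      by_cases hc : 0 ≤ i1
      · rw [if_pos hc]
        exact find_toNat_lt (by simp [hpat1]) (hi1 ▸ hc)
      · rw [if_neg hc]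
        have hc2 : 0 ≤ PySem.Chars.find t pat2 := by
          rw [hidx, if_neg hc] at h0; exact h0
        exact find_toNat_lt (by simp [hpat2]) hc2
    set i := idx.toNat with hi
    have hstartA : fbBack t i 0 = Nat.findGreatest (fun p => condA t (balF t (i + 1)) p = true) i := by
      have h2 := fbBack_eq t (balF t (i + 1)) i
      rwa [sub_self] at h2
    have hstartB :
        (PySem.List.max? (((fbS t (i + 1)).2.items.filter
            (fun kv => decide (kv.1 < (fbS t (i + 1)).1))).map (·.2)) (fun x => x)).getD 0
          = fbBack t i 0 := by
      rw [maxD_eq_foldl, start_eq, hstartA]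
    have hglen : fbBack t i 0 ≤ t.length := by
      rw [hstartA]
      have h3 := Nat.findGreatest_le (P := fun p => condA t (balF t (i + 1)) p = true) i
      omega
    rw [show fbS t (i + 1) = (List.range (i + 1)).foldl (fbStep t) (0, PySem.Dict.empty) from rfl] at hstartB
    rw [hstartB, fbEnd_eq_fbFwd t (t.length - fbBack t i 0) (fbBack t i 0) 0 rfl hglen]
  · rw [if_neg h0, if_neg h0]
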